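-- pv_equiv track=rewrite | github.com/wuodar/sda_python_datascience | block_2/exercises/ukrywanie_hasla.py | hide_password
-- ===== SOURCE A (Python) =====
-- def hide_password(password):
--     new_password = ""
--     password_list = list(password)
--     password_indexes = range(len(password_list))
--     for i, letter in zip(
--         password_indexes, password_list
--     ):  # tak działa enumerate, które jest użyte w rozwiązaniu numer 3
--         if (
--             i + 1
--         ) % 3 == 0:  # (i+1) bo indeksujemy od 0, ale w "realnym" świecie (nie komputerowym) liczymy od 1, % to operator dzielenia z resztą, zatem sprawdzamy czy ta reszta wynosi 0
--             new_password += "*"  # new_password += "*" jest równoważne z new_password = new_password + "*"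
--         else:
--             new_password += letter
--     return new_password
-- ===== SOURCE B (Python) =====
-- def hide_password(password):
--     out = []
--     rest = password
--     while len(rest) >= 3:
--         out.append(rest[:2] + '*')
--         rest = rest[3:]
--     return ''.join(out) + rest
-- ===== Notes on version B (the rewrite author's own statement) =====
-- stated objective: simpler
-- what changed: Replaces the indexed per-character loop testing (i+1)%3 with a direct recursion that emits each 3-character block as its first two characters plus '*' and returns a short tail verbatim.
import Mathlib
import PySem

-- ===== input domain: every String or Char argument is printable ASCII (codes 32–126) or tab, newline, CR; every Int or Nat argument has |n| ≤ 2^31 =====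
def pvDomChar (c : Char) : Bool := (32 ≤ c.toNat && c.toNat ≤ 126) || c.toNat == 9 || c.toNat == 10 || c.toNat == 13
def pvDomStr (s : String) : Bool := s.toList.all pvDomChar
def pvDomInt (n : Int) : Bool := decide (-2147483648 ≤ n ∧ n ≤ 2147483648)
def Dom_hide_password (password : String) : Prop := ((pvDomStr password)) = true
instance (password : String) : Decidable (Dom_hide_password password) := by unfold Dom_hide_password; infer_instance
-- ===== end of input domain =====

-- B replaces the per-character (i+1)%3 test with a while loop that emits each full
-- three-character block as its first two characters plus '*' and appends the short tail verbatim (objective: simpler).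

-- ===== PORT A =====
-- A: index every character, mask those whose 1-based position is divisible by 3.
def hide_password (password : String) : String :=
  let password_list := password.toList
  let zipped := (List.range password_list.length).zip password_list
  String.ofList (zipped.foldl
    (fun acc p => if (p.1 + 1) % 3 = 0 then acc ++ ['*'] else acc ++ [p.2]) [])

-- ===== PORT B =====
-- B (Source B): while at least 3 chars remain, emit the first two plus '*' and drop 3;
-- append the short remainder at the end.
def pvAltGo (out : List Char) (rest : List Char) : List Char :=
  if rest.length ≥ 3 then pvAltGo (out ++ (rest.take 2 ++ ['*'])) (rest.drop 3)
  else out ++ rest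
termination_by rest.length
decreasing_by simp; omega

def hide_password_alt (password : String) : String :=
  String.ofList (pvAltGo [] password.toList)

-- ===== PRECONDITION & SPEC =====
def Spec_hide_password (password : String) (out : String) : Prop := out = hide_password_alt password
instance (password : String) (out : String) : Decidable (Spec_hide_password password out) := by unfold Spec_hide_password; infer_instance

-- ===== CLAIM (what is proved, stated in full; the proofs are below) =====
def Claim_equal_hide_password : Prop := ∀ (password : String), Dom_hide_password password → Spec_hide_password password (hide_password password)

-- ===== LEMMAS AND PROOFS =====

-- A's masking as a recursion carrying the absolute index.
def pvMask (i : Nat) : List Char → List Char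
  | [] => []
  | c :: cs => (if (i + 1) % 3 = 0 then '*' else c) :: pvMask (i + 1) cs

theorem pvFold_eq (l : List Char) : ∀ (k : Nat) (acc : List Char),
    ((List.range' k l.length).zip l).foldl
      (fun acc p => if (p.1 + 1) % 3 = 0 then acc ++ ['*'] else acc ++ [p.2]) acc
    = acc ++ pvMask k l := by
  induction l with
  | nil => simp [pvMask]
  | cons c cs ih =>
    intro k acc
    simp only [List.length_cons, List.range'_succ, List.zip_cons_cons, List.foldl_cons, pvMask]
    rw [ih]
    split <;> simp

theorem pvMask_eq_altGo (out l : List Char) : ∀ (k : Nat), k % 3 = 0 →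
    pvAltGo out l = out ++ pvMask k l := by
  induction out, l using pvAltGo.induct with
  | case1 out l hge ih =>
    intro k hk
    rw [pvAltGo, if_pos hge]
    match l, hge, ih with
    | [], h, _ => exact absurd h (by simp)
    | [a], h, _ => exact absurd h (by simp)
    | [a, b], h, _ => exact absurd h (by simp)
    | a :: b :: c :: rest, _, ih =>
      simp only [pvMask, List.take, List.drop] at *
      rw [ih (k + 1 + 1 + 1) (by omega),
        if_neg (by omega), if_neg (by omega), if_pos (by omega)]
      simp
  | case2 out l hlt =>
    intro k hk
    rw [pvAltGo, if_neg hlt]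
    match l, hlt with
    | [], _ => rfl
    | [a], _ =>
      simp only [pvMask]
      rw [if_neg (by omega)]
    | [a, b], _ =>
      simp only [pvMask]
      rw [if_neg (by omega), if_neg (by omega)]
    | a :: b :: c :: rest, h =>
      exact absurd (show (a :: b :: c :: rest).length ≥ 3 by simp) h

-- ===== VERDICT (by name: the statement is the Claim_ definition above) =====
theorem hide_password_spec : Claim_equal_hide_password := by
  intro password _
  show _ = _
  unfold hide_password hide_password_alt
  have h := pvFold_eq password.toList 0 []
  rw [← List.range_eq_range'] at h
  exact congrArg String.ofList
    (h.trans (by rw [List.nil_append, pvMask_eq_altGo [] password.toList 0 rfl, List.nil_append]))
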